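-- pv_equiv track=rewrite | github.com/misty-step/landfall | scripts/synthesize.py | _check_empty_sections
-- ===== SOURCE A (Python) =====
-- def _check_empty_sections(lines: list[str]) -> list[str]:
--     issues: list[str] = []
--     heading_indices = [i for i, line in enumerate(lines) if line.strip().startswith("## ")]
--     for idx, start in enumerate(heading_indices):
--         end = heading_indices[idx + 1] if idx + 1 < len(heading_indices) else len(lines)
--         section_body = lines[start + 1 : end]
--         has_content = any(line.strip() for line in section_body)
--         if not has_content:
--             issues.append(f"empty section: {lines[start].strip()}")
--     return issues
-- ===== SOURCE B (Python) =====
-- def _check_empty_sections(lines: list[str]) -> list[str]: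
--     issues: list[str] = []
--     current: str | None = None  # stripped text of the pending heading
--     has_content = False
--     for line in lines:
--         s = line.strip()
--         if s.startswith("## "):
--             if current is not None and not has_content:
--                 issues.append(f"empty section: {current}")
--             current = s
--             has_content = False
--         elif current is not None and s:
--             has_content = True
--     if current is not None and not has_content:
--         issues.append(f"empty section: {current}")
--     return issues
-- ===== Notes on version B (the rewrite author's own statement) =====
-- stated objective: simpler
-- what changed: Replaced the two-pass index-based version (collect heading indices, then slice each section body) by a single linear pass carrying the pending heading and a has_content flag, flushing on the next heading and at end of input.
import Mathlib
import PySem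

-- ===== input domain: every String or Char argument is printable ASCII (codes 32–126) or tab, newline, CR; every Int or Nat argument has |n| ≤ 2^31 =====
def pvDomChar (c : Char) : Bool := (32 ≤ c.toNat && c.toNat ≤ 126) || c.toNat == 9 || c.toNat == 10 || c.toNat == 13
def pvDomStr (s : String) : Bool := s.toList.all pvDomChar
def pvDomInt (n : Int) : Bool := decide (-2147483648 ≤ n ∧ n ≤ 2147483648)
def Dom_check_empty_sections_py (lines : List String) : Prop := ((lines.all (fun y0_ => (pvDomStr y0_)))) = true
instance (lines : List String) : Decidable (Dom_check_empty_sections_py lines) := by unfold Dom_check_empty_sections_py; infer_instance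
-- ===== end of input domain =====

-- B replaces A's two passes (collect heading indices, then slice each section body) by one
-- linear pass carrying the pending heading and a has_content flag (objective: simpler).

-- ===== PORT A =====
def pvIsHead (l : String) : Bool := PySem.Str.startswith (PySem.Str.strip l) "## "

-- the comprehension '[i for i, line in enumerate(lines) if line.strip().startswith("## ")]'
def pvHeadIdxs : Nat → List String → List Nat
  | _, [] => []
  | i, l :: ls => if pvIsHead l then i :: pvHeadIdxs (i + 1) ls else pvHeadIdxs (i + 1) ls

-- the 'for idx, start in enumerate(heading_indices)' loop, with the explicit enumerate counter
def pvLoopA (lines : List String) (hs : List Nat) : Nat → List Nat → List String → List String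
  | _, [], issues => issues
  | idx, start :: rest, issues =>
    let e : Nat := if idx + 1 < hs.length then hs[idx + 1]! else lines.length
    let section_body := PySem.List.slice lines (some ((start : Int) + 1)) (some (e : Int))
    let has_content := section_body.any (fun line => PySem.Str.strip line != "")
    pvLoopA lines hs (idx + 1) rest
      (if !has_content then issues ++ ["empty section: " ++ PySem.Str.strip lines[start]!] else issues)

def check_empty_sections_py (lines : List String) : List String :=
  let heading_indices := pvHeadIdxs 0 lines
  pvLoopA lines heading_indices 0 heading_indices []

-- ===== PORT B =====
-- state: (current pending heading (stripped) or none, has_content flag, issues so far)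
def pvStepB (st : Option String × Bool × List String) (line : String) :
    Option String × Bool × List String :=
  let s := PySem.Str.strip line
  if PySem.Str.startswith s "## " then
    (some s, false,
      match st.1 with
      | some h => if st.2.1 then st.2.2 else st.2.2 ++ ["empty section: " ++ h]
      | none => st.2.2)
  else if st.1.isSome && s != "" then (st.1, true, st.2.2)
  else st

def check_empty_sections_py_alt (lines : List String) : List String :=
  let st := lines.foldl pvStepB (none, false, [])
  match st.1 with
  | some h => if st.2.1 then st.2.2 else st.2.2 ++ ["empty section: " ++ h]
  | none => st.2.2

-- ===== PRECONDITION & SPEC =====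
def Spec_check_empty_sections_py (lines : List String) (out : List String) : Prop := out = check_empty_sections_py_alt lines
instance (lines : List String) (out : List String) : Decidable (Spec_check_empty_sections_py lines out) := by unfold Spec_check_empty_sections_py; infer_instance

-- ===== CLAIM (what is proved, stated in full; the proofs are below) =====
def Claim_equal_check_empty_sections_py : Prop := ∀ (lines : List String), Dom_check_empty_sections_py lines → Spec_check_empty_sections_py lines (check_empty_sections_py lines)

-- ===== LEMMAS AND PROOFS =====

-- final flush of B's state
def pvFlush : Option String × Bool × List String → List String
  | (some h, has, issues) => if has then issues else issues ++ ["empty section: " ++ h]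
  | (none, _, issues) => issues

-- issues emitted when a pending section ends
def pvEmit : Option String → Bool → List String
  | some h, has => if has then [] else ["empty section: " ++ h]
  | none, _ => []

-- common recursive specification of both programs
def pvRunP : Option String → Bool → List String → List String
  | cur, has, [] => pvEmit cur has
  | cur, has, l :: ls =>
    let s := PySem.Str.strip l
    if PySem.Str.startswith s "## " then pvEmit cur has ++ pvRunP (some s) false ls
    else if cur.isSome && s != "" then pvRunP cur true ls
    else pvRunP cur has ls

-- one iteration of A's loop: heading at index 'start', section body up to 'e'
def pvStepA (lines : List String) (start e : Nat) (issues : List String) : List String :=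
  if !(((lines.drop (start + 1)).take (e - (start + 1))).any
        (fun line => PySem.Str.strip line != "")) then
    issues ++ ["empty section: " ++ PySem.Str.strip lines[start]!]
  else issues

-- A's loop rewritten on (start, next-or-end) pairs, without the enumerate counter
def pvPairLoop (lines : List String) : List Nat → List String → List String
  | [], issues => issues
  | [start], issues => pvStepA lines start lines.length issues
  | start :: s' :: rest, issues => pvPairLoop lines (s' :: rest) (pvStepA lines start s' issues)

theorem pvRunP_cons_head (cur : Option String) (has : Bool) (l : String) (ls : List String)
    (h : PySem.Str.startswith (PySem.Str.strip l) "## " = true) :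
    pvRunP cur has (l :: ls) = pvEmit cur has ++ pvRunP (some (PySem.Str.strip l)) false ls := by
  rw [pvRunP]; simp only [h]; simp

theorem pvRunP_cons_content (cur : Option String) (has : Bool) (l : String) (ls : List String)
    (h1 : PySem.Str.startswith (PySem.Str.strip l) "## " = false)
    (h2 : (cur.isSome && PySem.Str.strip l != "") = true) :
    pvRunP cur has (l :: ls) = pvRunP cur true ls := by
  rw [pvRunP]; simp only [h1, h2]; simp

theorem pvRunP_cons_skip (cur : Option String) (has : Bool) (l : String) (ls : List String)
    (h1 : PySem.Str.startswith (PySem.Str.strip l) "## " = false)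
    (h2 : (cur.isSome && PySem.Str.strip l != "") = false) :
    pvRunP cur has (l :: ls) = pvRunP cur has ls := by
  rw [pvRunP]; simp only [h1, h2]; simp

theorem pvLoopA_eq_pairLoop (lines : List String) (hs : List Nat) :
    ∀ (rest : List Nat) (idx : Nat) (issues : List String), hs.drop idx = rest →
      pvLoopA lines hs idx rest issues = pvPairLoop lines rest issues := by
  intro rest
  induction rest with
  | nil => intro idx issues _; simp [pvLoopA, pvPairLoop]
  | cons start rest ih =>
    intro idx issues hdrop
    have hidx : idx < hs.length := by
      by_contra hc
      have : hs.drop idx = [] := List.drop_eq_nil_of_le (by omega)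
      simp [this] at hdrop
    have hlen : hs.length = idx + 1 + rest.length := by
      have h1 := congrArg List.length hdrop
      simp [List.length_drop] at h1
      omega
    have hdrop' : hs.drop (idx + 1) = rest := by
      have h1 := congrArg (List.drop 1) hdrop
      rw [List.drop_drop] at h1
      simpa [Nat.add_comm] using h1
    have hcast : ((start : Int) + 1) = (((start + 1 : Nat)) : Int) := by push_cast; ring
    cases rest with
    | nil =>
      have hnlt : ¬ (idx + 1 < hs.length) := by simp at hlen; omega
      simp only [pvLoopA, pvPairLoop, if_neg hnlt, hcast, PySem.List.slice_natCast]
      rfl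
    | cons s' rest' =>
      have hlt : idx + 1 < hs.length := by simp at hlen; omega
      have hget : hs[idx + 1]! = s' := by
        have h0 : (hs.drop (idx + 1))[0]? = some s' := by rw [hdrop']; rfl
        rw [List.getElem?_drop] at h0
        simp only [Nat.add_zero] at h0
        simp [List.getElem!_eq_getElem?_getD, h0]
      simp only [pvLoopA, pvPairLoop, if_pos hlt, hget, hcast, PySem.List.slice_natCast]
      exact ih (idx + 1) _ hdrop'

theorem pvHeadIdxs_shift (ls : List String) : ∀ i : Nat,
    pvHeadIdxs (i + 1) ls = (pvHeadIdxs i ls).map (· + 1) := by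
  induction ls with
  | nil => intro i; simp [pvHeadIdxs]
  | cons l ls ih =>
    intro i
    by_cases h : pvIsHead l <;> simp [pvHeadIdxs, h, ih (i + 1)]

theorem pvHeadIdxs_cons (l : String) (ls : List String) :
    pvHeadIdxs 0 (l :: ls) = if pvIsHead l then 0 :: (pvHeadIdxs 0 ls).map (· + 1)
      else (pvHeadIdxs 0 ls).map (· + 1) := by
  by_cases h : pvIsHead l <;> simp [pvHeadIdxs, h, pvHeadIdxs_shift]

theorem pvStepA_shift (x : String) (xs : List String) (start e : Nat) (issues : List String) :
    pvStepA (x :: xs) (start + 1) (e + 1) issues = pvStepA xs start e issues := by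
  unfold pvStepA
  have h1 : (x :: xs).drop (start + 1 + 1) = xs.drop (start + 1) := by
    rw [List.drop_succ_cons]
  have h2 : (e + 1) - (start + 1 + 1) = e - (start + 1) := by omega
  have h3 : (x :: xs)[start + 1]! = xs[start]! := by
    simp [List.getElem!_eq_getElem?_getD]
  rw [h1, h2, h3]

theorem pvPairLoop_shift (hs : List Nat) : ∀ (x : String) (xs : List String) (issues : List String),
    pvPairLoop (x :: xs) (hs.map (· + 1)) issues = pvPairLoop xs hs issues := by
  induction hs with
  | nil => intro x xs issues; simp [pvPairLoop]
  | cons start hs ih =>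
    intro x xs issues
    cases hs with
    | nil =>
      show pvPairLoop (x :: xs) [start + 1] issues = pvPairLoop xs [start] issues
      simp only [pvPairLoop]
      have : (x :: xs).length = xs.length + 1 := rfl
      rw [this, pvStepA_shift]
    | cons s' hs' =>
      show pvPairLoop (x :: xs) ((start + 1) :: (s' + 1) :: hs'.map (· + 1)) issues
        = pvPairLoop xs (start :: s' :: hs') issues
      simp only [pvPairLoop]
      rw [pvStepA_shift]
      exact ih x xs _

theorem pvHeadIdxs_first (ls : List String) :
    (pvHeadIdxs 0 ls = [] ∧ ls.takeWhile (fun x => !pvIsHead x) = ls ∧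
      ls.dropWhile (fun x => !pvIsHead x) = [])
    ∨ (∃ j tl, pvHeadIdxs 0 ls = j :: tl ∧ ls.takeWhile (fun x => !pvIsHead x) = ls.take j ∧
      ls.dropWhile (fun x => !pvIsHead x) = ls.drop j) := by
  induction ls with
  | nil => left; simp [pvHeadIdxs]
  | cons l ls ih =>
    by_cases h : pvIsHead l
    · right
      exact ⟨0, (pvHeadIdxs 0 ls).map (· + 1), by simp [pvHeadIdxs_cons, h],
        by simp [List.takeWhile_cons, h], by simp [List.dropWhile_cons, h]⟩
    · rcases ih with ⟨h0, htw, hdw⟩ | ⟨j, tl, h0, htw, hdw⟩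
      · left
        refine ⟨by simp [pvHeadIdxs_cons, h, h0], ?_, ?_⟩
        · simp [List.takeWhile_cons, h, htw]
        · simp [List.dropWhile_cons, h, hdw]
      · right
        refine ⟨j + 1, tl.map (· + 1), by simp [pvHeadIdxs_cons, h, h0], ?_, ?_⟩
        · simp [List.takeWhile_cons, h, htw]
        · simp [List.dropWhile_cons, h, hdw]

theorem pvRunP_pending (ls : List String) : ∀ (h : String) (has : Bool),
    pvRunP (some h) has ls =
      (if has || (ls.takeWhile (fun x => !pvIsHead x)).any
          (fun l => PySem.Str.strip l != "") then [] else ["empty section: " ++ h])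
      ++ pvRunP none false (ls.dropWhile (fun x => !pvIsHead x)) := by
  induction ls with
  | nil => intro h has; cases has <;> simp [pvRunP, pvEmit]
  | cons l ls ih =>
    intro h has
    by_cases hl : pvIsHead l
    · have hl' : PySem.Str.startswith (PySem.Str.strip l) "## " = true := hl
      rw [pvRunP_cons_head _ _ _ _ hl']
      simp only [List.takeWhile_cons, List.dropWhile_cons, hl, Bool.not_true, if_neg Bool.false_ne_true]
      rw [pvRunP_cons_head _ _ _ _ hl']
      cases has <;> simp [pvEmit]
    · have hl' : PySem.Str.startswith (PySem.Str.strip l) "## " = false := by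
        simpa [pvIsHead] using hl
      simp only [List.takeWhile_cons, List.dropWhile_cons, hl, Bool.not_false, if_pos rfl]
      by_cases hc : PySem.Str.strip l != ""
      · rw [pvRunP_cons_content _ _ _ _ hl' (by simp [hc]), ih h true]
        simp [hc]
      · rw [pvRunP_cons_skip _ _ _ _ hl' (by simpa using hc), ih h has]
        simp at hc
        simp [hc]

theorem pvRunP_none_dropWhile (ls : List String) :
    pvRunP none false ls = pvRunP none false (ls.dropWhile (fun x => !pvIsHead x)) := by
  induction ls with
  | nil => simp
  | cons l ls ih =>
    by_cases hl : pvIsHead l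
    · simp [List.dropWhile_cons, hl]
    · have hl' : PySem.Str.startswith (PySem.Str.strip l) "## " = false := by
        simpa [pvIsHead] using hl
      rw [pvRunP_cons_skip _ _ _ _ hl' (by simp)]
      simp [List.dropWhile_cons, hl, ih]

theorem pvPairLoop_headIdxs (ls : List String) : ∀ issues : List String,
    pvPairLoop ls (pvHeadIdxs 0 ls) issues = issues ++ pvRunP none false ls := by
  induction ls with
  | nil => intro issues; simp [pvHeadIdxs, pvPairLoop, pvRunP, pvEmit]
  | cons l ls ih =>
    intro issues
    rw [pvHeadIdxs_cons]
    by_cases hl : pvIsHead l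
    · have hl' : PySem.Str.startswith (PySem.Str.strip l) "## " = true := hl
      rw [if_pos hl]
      rw [pvRunP_cons_head _ _ _ _ hl']
      simp only [pvEmit, List.nil_append]
      rw [pvRunP_pending]
      rcases pvHeadIdxs_first ls with ⟨h0, htw, hdw⟩ | ⟨j, tl, h0, htw, hdw⟩
      · rw [h0, htw, hdw]
        show pvPairLoop (l :: ls) [0] issues = _
        simp only [pvPairLoop, pvStepA]
        have hbody : ((l :: ls).drop (0 + 1)).take ((l :: ls).length - (0 + 1)) = ls := by
          simp
        rw [hbody]
        have hget : (l :: ls)[0]! = l := by simp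
        rw [hget]
        by_cases hc : ls.any (fun line => PySem.Str.strip line != "") <;>
          simp [hc, pvRunP, pvEmit]
      · rw [h0, htw, hdw]
        show pvPairLoop (l :: ls) (0 :: (j + 1) :: tl.map (· + 1)) issues = _
        rw [pvPairLoop]
        have hrest : ((j + 1) :: tl.map (· + 1)) = (pvHeadIdxs 0 ls).map (· + 1) := by
          rw [h0]; simp
        rw [hrest, pvPairLoop_shift, ih]
        have hstep : pvStepA (l :: ls) 0 (j + 1) issues
            = issues ++ (if (ls.take j).any (fun line => PySem.Str.strip line != "")
                then [] else ["empty section: " ++ PySem.Str.strip l]) := by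
          unfold pvStepA
          have hbody : ((l :: ls).drop (0 + 1)).take ((j + 1) - (0 + 1)) = ls.take j := by
            simp
          rw [hbody]
          have hget : (l :: ls)[0]! = l := by simp
          rw [hget]
          by_cases hc : (ls.take j).any (fun line => PySem.Str.strip line != "") <;> simp [hc]
        rw [hstep, pvRunP_none_dropWhile ls, hdw]
        simp [List.append_assoc]
    · have hl' : PySem.Str.startswith (PySem.Str.strip l) "## " = false := by
        simpa [pvIsHead] using hl
      rw [if_neg hl, pvPairLoop_shift, ih, pvRunP_cons_skip _ _ _ _ hl' (by simp)]

theorem pvFlush_eq (st : Option String × Bool × List String) :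
    (match st.1 with
      | some h => if st.2.1 then st.2.2 else st.2.2 ++ ["empty section: " ++ h]
      | none => st.2.2) = pvFlush st := by
  rcases st with ⟨cur, has, issues⟩
  cases cur <;> rfl

theorem pvFoldB (ls : List String) : ∀ (cur : Option String) (has : Bool) (issues : List String),
    pvFlush (ls.foldl pvStepB (cur, has, issues)) = issues ++ pvRunP cur has ls := by
  induction ls with
  | nil =>
    intro cur has issues
    cases cur <;> cases has <;> simp [pvFlush, pvRunP, pvEmit]
  | cons l ls ih =>
    intro cur has issues
    rw [List.foldl_cons]
    by_cases hl : PySem.Str.startswith (PySem.Str.strip l) "## "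
    · have hlc : PySem.Chars.startswith (PySem.Chars.strip l.toList) ['#', '#', ' '] = true := by
        simpa using hl
      have hstep : pvStepB (cur, has, issues) l
          = (some (PySem.Str.strip l), false, issues ++ pvEmit cur has) := by
        cases cur <;> cases has <;> simp [pvStepB, hlc, pvEmit]
      rw [hstep, ih, pvRunP_cons_head _ _ _ _ hl]
      simp [List.append_assoc]
    · have hl' : PySem.Str.startswith (PySem.Str.strip l) "## " = false := by simpa using hl
      have hlc : PySem.Chars.startswith (PySem.Chars.strip l.toList) ['#', '#', ' '] = false := by
        simpa using hl'
      by_cases hc : (cur.isSome && PySem.Str.strip l != "") = true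
      · have hstep : pvStepB (cur, has, issues) l = (cur, true, issues) := by
          rcases cur with _ | c
          · simp at hc
          · simp only [pvStepB]
            simp [hlc]
            simp at hc
            simp [hc]
        rw [hstep, ih, pvRunP_cons_content _ _ _ _ hl' hc]
      · have hstep : pvStepB (cur, has, issues) l = (cur, has, issues) := by
          simp only [pvStepB]
          simp [hlc]
          intro h1
          simp_all
        rw [hstep, ih, pvRunP_cons_skip _ _ _ _ hl' (by simpa using hc)]

-- ===== VERDICT (by name: the statement is the Claim_ definition above) =====
theorem check_empty_sections_py_spec : Claim_equal_check_empty_sections_py := by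
  intro lines _
  unfold Spec_check_empty_sections_py
  have hA : check_empty_sections_py lines = pvRunP none false lines := by
    unfold check_empty_sections_py
    rw [pvLoopA_eq_pairLoop lines (pvHeadIdxs 0 lines) (pvHeadIdxs 0 lines) 0 [] (by simp)]
    simpa using pvPairLoop_headIdxs lines []
  have hB : check_empty_sections_py_alt lines = pvRunP none false lines := by
    unfold check_empty_sections_py_alt
    rw [pvFlush_eq, pvFoldB]
    simp
  rw [hA, hB]
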